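-- pv_equiv track=rewrite | github.com/renee306/Data-Literacy-WiSe-2024-25---Stadt-Land-Flu-Optimization | proc/beruf_proc.py | remove_parentheses_content
-- ===== SOURCE A (Python) =====
-- def remove_parentheses_content(text):
--     result = []
--     i = 0
--     length = len(text)
--
--     while i < length:
--         # Remove parentheses and their content if preceded by a whitespace
--         if text[i] == "(" and i > 0 and text[i - 1] == " ":
--             result.pop()
--             depth = 1
--             i += 1
--
--             # Keep track of nested parentheses
--             while i < length and depth > 0:
--                 if text[i] == "(":
--                     depth += 1
--                 elif text[i] == ")":
--                     depth -= 1
--                 i += 1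
--
--             continue
--
--         result.append(text[i])
--         i += 1
--
--     return "".join(result)
-- ===== SOURCE B (Python) =====
-- def _match_end(text, i):
--     # i points at a depth-0 "(": return the index just past its matching ")",
--     # or len(text) if it is never closed.
--     depth = 1
--     j = i + 1
--     n = len(text)
--     while j < n:
--         if text[j] == "(":
--             depth += 1
--         elif text[j] == ")":
--             depth -= 1
--             if depth == 0:
--                 return j + 1
--         j += 1
--     return n
--
--
-- def remove_parentheses_content(text):
--     # Pass 1: collect the index ranges [s, e) to delete.
--     ranges = []
--     i = 0
--     n = len(text)
--     while i < n:
--         if text[i] == "(" and i > 0 and text[i - 1] == " ":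
--             e = _match_end(text, i)
--             ranges.append((i - 1, e))  # also drop the single preceding space
--             i = e
--         else:
--             i += 1
--     # Pass 2: concatenate the surviving slices.
--     pieces = []
--     pos = 0
--     for s, e in ranges:
--         pieces.append(text[pos:s])
--         pos = e
--     pieces.append(text[pos:])
--     return "".join(pieces)
-- ===== Notes on version B (the rewrite author's own statement) =====
-- stated objective: alternative
-- what changed: B replaces A's character-by-character copy with pop() by a two-pass algorithm: first collect the (start,end) deletion ranges (range start extended over the single preceding space, end found by a matching-parenthesis scan), then rebuild the result by joining the surviving slices.
import Mathlib
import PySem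

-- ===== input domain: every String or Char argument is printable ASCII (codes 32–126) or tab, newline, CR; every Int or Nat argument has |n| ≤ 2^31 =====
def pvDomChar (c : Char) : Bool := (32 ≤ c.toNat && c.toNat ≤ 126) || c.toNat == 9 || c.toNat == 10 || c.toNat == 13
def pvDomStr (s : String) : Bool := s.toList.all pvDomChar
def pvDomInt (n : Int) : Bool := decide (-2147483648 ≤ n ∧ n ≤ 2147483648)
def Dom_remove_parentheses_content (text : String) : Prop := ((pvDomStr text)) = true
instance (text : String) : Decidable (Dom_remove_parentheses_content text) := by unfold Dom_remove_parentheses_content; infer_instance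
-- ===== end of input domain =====

-- B separates range-finding from reconstruction (collect deletion ranges, then join the
-- surviving slices) instead of A's char-by-char copy with pop; objective: alternative.
-- Both ports drive each while loop by a structural fuel counter that only guards
-- totality: fuel starts at cs.length and each loop body consumes one unit per index
-- step, so it is exhausted only when the Python loop condition has already failed.

-- ===== PORT A =====
-- A's inner while loop: consume until depth returns to 0 or the string ends; returns final i.
def skipA (cs : List Char) (fuel : Nat) (i : Nat) (depth : Int) : Nat :=
  match fuel with
  | 0 => i
  | f + 1 =>
    if i < cs.length ∧ 0 < depth then
      skipA cs f (i + 1)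
        (if cs[i]! = '(' then depth + 1 else if cs[i]! = ')' then depth - 1 else depth)
    else i

-- A's outer while loop, accumulating result.
def goA (cs : List Char) (fuel : Nat) (i : Nat) (res : List Char) : List Char :=
  match fuel with
  | 0 => res
  | f + 1 =>
    if i < cs.length then
      if cs[i]! = '(' ∧ 0 < i ∧ cs[i - 1]! = ' ' then
        goA cs f (skipA cs f (i + 1) 1) res.dropLast
      else
        goA cs f (i + 1) (res ++ [cs[i]!])
    else res

def remove_parentheses_content (text : String) : String :=
  String.mk (goA text.toList text.toList.length 0 [])

-- ===== PORT B =====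
-- _match_end's loop: j runs from i+1; on ')' at depth 1 return j+1, else len(text).
def mEnd (cs : List Char) (fuel : Nat) (j : Nat) (depth : Int) : Nat :=
  match fuel with
  | 0 => cs.length
  | f + 1 =>
    if j < cs.length then
      if cs[j]! = '(' then mEnd cs f (j + 1) (depth + 1)
      else if cs[j]! = ')' then
        if depth - 1 = 0 then j + 1 else mEnd cs f (j + 1) (depth - 1)
      else mEnd cs f (j + 1) depth
    else cs.length

-- Pass 1 of B: collect the deletion ranges.
def goRangesB (cs : List Char) (fuel : Nat) (i : Nat) (acc : List (Nat × Nat)) : List (Nat × Nat) :=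
  match fuel with
  | 0 => acc
  | f + 1 =>
    if i < cs.length then
      if cs[i]! = '(' ∧ 0 < i ∧ cs[i - 1]! = ' ' then
        goRangesB cs f (mEnd cs f (i + 1) 1) (acc ++ [(i - 1, mEnd cs f (i + 1) 1)])
      else goRangesB cs f (i + 1) acc
    else acc

def remove_parentheses_content_alt (text : String) : String :=
  let cs := text.toList
  let ranges := goRangesB cs cs.length 0 []
  let st := ranges.foldl
    (fun (st : List Char × Nat) (r : Nat × Nat) => (st.1 ++ cs.extract st.2 r.1, r.2))
    (([] : List Char), 0)
  String.mk (st.1 ++ cs.drop st.2)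

-- ===== PRECONDITION & SPEC =====
def Spec_remove_parentheses_content (text : String) (out : String) : Prop := out = remove_parentheses_content_alt text
instance (text : String) (out : String) : Decidable (Spec_remove_parentheses_content text out) := by unfold Spec_remove_parentheses_content; infer_instance

-- ===== CLAIM (what is proved, stated in full; the proofs are below) =====
def Claim_equal_remove_parentheses_content : Prop := ∀ (text : String), Dom_remove_parentheses_content text → Spec_remove_parentheses_content text (remove_parentheses_content text)

-- ===== LEMMAS AND PROOFS =====

theorem mEnd_ge (cs : List Char) (fuel : Nat) (j : Nat) (d : Int) (hj : j ≤ cs.length) :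
    j ≤ mEnd cs fuel j d := by
  induction fuel generalizing j d with
  | zero => simpa [mEnd] using hj
  | succ f ih =>
      simp only [mEnd]
      split
      · split
        · exact le_trans (by omega) (ih (j + 1) _ (by omega))
        · split
          · split
            · omega
            · exact le_trans (by omega) (ih (j + 1) _ (by omega))
          · exact le_trans (by omega) (ih (j + 1) _ (by omega))
      · omega

theorem mEnd_le (cs : List Char) (fuel : Nat) (j : Nat) (d : Int) (hj : j ≤ cs.length) :
    mEnd cs fuel j d ≤ cs.length := by
  induction fuel generalizing j d with
  | zero => simp [mEnd]
  | succ f ih =>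
      simp only [mEnd]
      split
      · split
        · exact ih (j + 1) _ (by omega)
        · split
          · split
            · omega
            · exact ih (j + 1) _ (by omega)
          · exact ih (j + 1) _ (by omega)
      · omega

-- A's inner loop and B's _match_end agree (positive depth, enough fuel).
theorem skip_eq_mEnd (cs : List Char) (fuel : Nat) (j : Nat) (d : Int) (hd : 0 < d)
    (hj : j ≤ cs.length) (hf : cs.length ≤ j + fuel) :
    skipA cs fuel j d = mEnd cs fuel j d := by
  induction fuel generalizing j d with
  | zero => simp only [skipA, mEnd]; omega
  | succ f ih =>
      simp only [skipA, mEnd]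
      by_cases hjn : j < cs.length
      · rw [if_pos (And.intro hjn hd), if_pos hjn]
        by_cases h1 : cs[j]! = '('
        · rw [if_pos h1, if_pos h1]
          exact ih (j + 1) (d + 1) (by omega) (by omega) (by omega)
        · by_cases h2 : cs[j]! = ')'
          · rw [if_neg h1, if_pos h2, if_neg h1, if_pos h2]
            by_cases hz : d - 1 = 0
            · rw [if_pos hz]
              cases f with
              | zero => simp [skipA]
              | succ f' => simp only [skipA]; rw [if_neg (by omega)]
            · rw [if_neg hz]
              exact ih (j + 1) (d - 1) (by omega) (by omega) (by omega)
          · rw [if_neg h1, if_neg h2, if_neg h1, if_neg h2]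
            exact ih (j + 1) d hd (by omega) (by omega)
      · rw [if_neg (by omega), if_neg hjn]
        omega

-- Where _match_end stops: at the end of the string, or just past a ')'.
theorem mEnd_end (cs : List Char) (fuel : Nat) (j : Nat) (d : Int) (hj : j ≤ cs.length) :
    mEnd cs fuel j d = cs.length ∨
      (0 < mEnd cs fuel j d ∧ cs[mEnd cs fuel j d - 1]! = ')') := by
  induction fuel generalizing j d with
  | zero => left; simp [mEnd]
  | succ f ih =>
      simp only [mEnd]
      split
      · split
        · exact ih (j + 1) _ (by omega)
        · split
          · split
            · rename_i h1 h2 _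
              right
              refine ⟨by omega, ?_⟩
              simp only [Nat.add_sub_cancel]
              exact h2
            · exact ih (j + 1) _ (by omega)
          · exact ih (j + 1) _ (by omega)
      · left; rfl

-- The shape of the range list produced from position i.
def GoodChain (cs : List Char) : Nat → List (Nat × Nat) → Prop
  | _, [] => True
  | i, (s, e) :: r =>
      i ≤ s + 1 ∧ s + 2 ≤ e ∧ e ≤ cs.length ∧ s < cs.length ∧ cs[s]! = ' ' ∧
        (e = cs.length ∨ cs[e - 1]! = ')') ∧ GoodChain cs e r

theorem goodChain_mono (cs : List Char) (i i' : Nat) (R : List (Nat × Nat))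
    (h : i ≤ i') (hg : GoodChain cs i' R) : GoodChain cs i R := by
  cases R with
  | nil => trivial
  | cons p r =>
      obtain ⟨s, e⟩ := p
      unfold GoodChain at hg ⊢
      exact ⟨by omega, hg.2⟩

theorem goRangesB_acc (cs : List Char) (fuel : Nat) (i : Nat) (acc : List (Nat × Nat)) :
    goRangesB cs fuel i acc = acc ++ goRangesB cs fuel i [] := by
  induction fuel generalizing i acc with
  | zero => simp [goRangesB]
  | succ f ih =>
      simp only [goRangesB]
      split
      · split
        · rw [ih (mEnd cs f (i + 1) 1) (acc ++ _), ih (mEnd cs f (i + 1) 1) ([] ++ _)]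
          simp
        · exact ih (i + 1) acc
      · simp

theorem goRangesB_good (cs : List Char) (fuel : Nat) (i : Nat) (hi : i ≤ cs.length)
    (hf : cs.length ≤ i + fuel) : GoodChain cs i (goRangesB cs fuel i []) := by
  induction fuel generalizing i with
  | zero => simp only [goRangesB]; trivial
  | succ f ih =>
      simp only [goRangesB]
      split
      · rename_i h
        split
        · rename_i ht
          obtain ⟨ht1, ht2, ht3⟩ := ht
          rw [goRangesB_acc]
          have hge := mEnd_ge cs f (i + 1) 1 (by omega)
          have hle := mEnd_le cs f (i + 1) 1 (by omega)
          simp only [List.nil_append]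
          refine ⟨by omega, by omega, hle, by omega, ht3, ?_, ?_⟩
          · rcases mEnd_end cs f (i + 1) 1 (by omega) with he | he
            · exact Or.inl he
            · exact Or.inr he.2
          · exact ih (mEnd cs f (i + 1) 1) hle (by omega)
        · exact goodChain_mono cs i (i + 1) _ (by omega) (ih (i + 1) (by omega) (by omega))
      · trivial

-- Reference reconstruction used to bridge A's loop and B's fold.
def rb (cs : List Char) (res : List Char) (pos : Nat) : List (Nat × Nat) → List Char
  | [] => res ++ cs.drop pos
  | (s, e) :: r =>
      if s < pos then rb cs res.dropLast e r else rb cs (res ++ cs.extract pos s) e r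

-- One kept character moves from the pending slice into the accumulator.
theorem rb_step (cs : List Char) (R : List (Nat × Nat)) (res : List Char) (i : Nat)
    (hi : i < cs.length) (hg : GoodChain cs (i + 1) R) :
    rb cs res i R = rb cs (res ++ [cs[i]!]) (i + 1) R := by
  cases R with
  | nil =>
      show res ++ cs.drop i = (res ++ [cs[i]!]) ++ cs.drop (i + 1)
      rw [List.drop_eq_getElem_cons hi, getElem!_pos cs i hi]
      simp
  | cons p r =>
      obtain ⟨s, e⟩ := p
      have hs : i ≤ s := by have := hg.1; omega
      by_cases hsi : s = i
      · subst hsi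
        simp only [rb]
        rw [if_neg (by omega), if_pos (by omega)]
        rw [show res ++ cs.extract s s = res by simp]
        rw [show (res ++ [cs[s]!]).dropLast = res by simp]
      · have hlt : i < s := by omega
        simp only [rb]
        rw [if_neg (by omega), if_neg (by omega)]
        have hext : cs.extract i s = cs[i]! :: cs.extract (i + 1) s := by
          simp only [List.extract_eq_take_drop]
          rw [List.drop_eq_getElem_cons hi, getElem!_pos cs i hi]
          have hsub : s - i = (s - (i + 1)) + 1 := by omega
          rw [hsub, List.take_succ_cons]
        rw [hext, List.append_assoc]
        rfl

-- A's whole loop computes the reference reconstruction of B's ranges.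
theorem goA_eq_rb (cs : List Char) (fuel : Nat) (i : Nat) (res : List Char)
    (hi : i ≤ cs.length) (hf : cs.length ≤ i + fuel) :
    goA cs fuel i res = rb cs res i (goRangesB cs fuel i []) := by
  induction fuel generalizing i res with
  | zero =>
      simp only [goA, goRangesB, rb]
      rw [List.drop_eq_nil_of_le (by omega)]
      simp
  | succ f ih =>
      simp only [goA, goRangesB]
      split
      · rename_i h
        split
        · rename_i ht
          obtain ⟨ht1, ht2, ht3⟩ := ht
          rw [goRangesB_acc]
          have hge := mEnd_ge cs f (i + 1) 1 (by omega)
          have hle := mEnd_le cs f (i + 1) 1 (by omega)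
          rw [skip_eq_mEnd cs f (i + 1) 1 (by omega) (by omega) (by omega)]
          simp only [List.nil_append, List.singleton_append]
          have hrb : rb cs res i ((i - 1, mEnd cs f (i + 1) 1) :: goRangesB cs f (mEnd cs f (i + 1) 1) [])
              = rb cs res.dropLast (mEnd cs f (i + 1) 1) (goRangesB cs f (mEnd cs f (i + 1) 1) []) := by
            simp only [rb]
            rw [if_pos (by omega)]
          rw [hrb]
          exact ih (mEnd cs f (i + 1) 1) res.dropLast hle (by omega)
        · rename_i ht
          rw [ih (i + 1) (res ++ [cs[i]!]) (by omega) (by omega)]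
          exact (rb_step cs _ res i h (goRangesB_good cs f (i + 1) (by omega) (by omega))).symm
      · show res = res ++ cs.drop i
        rw [List.drop_eq_nil_of_le (by omega)]
        simp

-- The reference reconstruction equals B's slice-joining fold.
theorem rb_eq_fold (cs : List Char) (R : List (Nat × Nat)) (res : List Char) (pos : Nat)
    (hg : GoodChain cs pos R)
    (hpos : pos = 0 ∨ pos = cs.length ∨ cs[pos - 1]! = ')') :
    rb cs res pos R =
      (R.foldl (fun (st : List Char × Nat) (r : Nat × Nat) =>
          (st.1 ++ cs.extract st.2 r.1, r.2)) (res, pos)).1 ++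
        cs.drop (R.foldl (fun (st : List Char × Nat) (r : Nat × Nat) =>
          (st.1 ++ cs.extract st.2 r.1, r.2)) (res, pos)).2 := by
  induction R generalizing res pos with
  | nil => rfl
  | cons p r ih =>
      obtain ⟨s, e⟩ := p
      obtain ⟨h1, h2, h3, h4, h5, h6, h7⟩ := hg
      have hps : pos ≤ s := by
        by_contra hc
        have hse : pos - 1 = s := by omega
        rcases hpos with h0 | h0 | h0
        · omega
        · omega
        · rw [hse, h5] at h0
          exact absurd h0 (by decide)
      simp only [rb, List.foldl_cons]
      rw [if_neg (by omega : ¬ s < pos)]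
      exact ih (res ++ cs.extract pos s) e h7 (Or.inr h6)

-- ===== VERDICT (by name: the statement is the Claim_ definition above) =====
theorem remove_parentheses_content_spec : Claim_equal_remove_parentheses_content := by
  intro text _
  show remove_parentheses_content text = remove_parentheses_content_alt text
  have hmain := rb_eq_fold text.toList (goRangesB text.toList text.toList.length 0 []) [] 0
    (goRangesB_good text.toList text.toList.length 0 (by omega) (by omega)) (Or.inl rfl)
  show String.mk (goA text.toList text.toList.length 0 []) =
    String.mk ((((goRangesB text.toList text.toList.length 0 []).foldl
        (fun (st : List Char × Nat) (r : Nat × Nat) =>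
          (st.1 ++ text.toList.extract st.2 r.1, r.2)) ([], 0)).1) ++
      text.toList.drop (((goRangesB text.toList text.toList.length 0 []).foldl
        (fun (st : List Char × Nat) (r : Nat × Nat) =>
          (st.1 ++ text.toList.extract st.2 r.1, r.2)) ([], 0)).2))
  rw [goA_eq_rb text.toList text.toList.length 0 [] (by omega) (by omega), hmain]
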